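-- pv_equiv track=rewrite | github.com/bangnh1/Terrain | valid.py | validateParameter
-- ===== SOURCE A (Python) =====
-- import copy
--
-- def validateParameter(data, validParamter, restrictionParameter):
--
--     newData = {}
--     newDict = {}
--     for key, value in data.items():
--         for parameter in validParamter:
--             if parameter in key:
--                 newDict[key] = value
--
--     newData = copy.deepcopy(newDict)
--     for key, value in newDict.items():
--         for parameter in restrictionParameter:
--             if parameter in key:
--                 del newData[key]
--
--     return newData
-- ===== SOURCE B (Python) =====
-- import copy
--
-- def validateParameter(data, validParamter, restrictionParameter):
--     # Parameter-major set algebra instead of key-major loop passes: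
--     # build the set of keys hit by any valid parameter, the set hit by any
--     # restriction parameter, take their difference, then project data onto it.
--     keys = list(data)
--     valid = set()
--     for p in validParamter:
--         valid.update(k for k in keys if p in k)
--     restricted = set()
--     for p in restrictionParameter:
--         restricted.update(k for k in keys if p in k)
--     kept = valid - restricted
--     return {k: copy.deepcopy(v) for k, v in data.items() if k in kept}
-- ===== Notes on version B (the rewrite author's own statement) =====
-- stated objective: alternative
-- what changed: Replaces A's key-major build-then-deepcopy-then-delete dict passes with parameter-major set algebra: for each valid/restriction parameter collect the set of matching keys by set.update, form kept = valid - restricted with set difference, and project data onto the kept-key set in one final comprehension.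
-- crash fix: A raises KeyError when some key that matches a valid parameter contains at least two of the restriction parameters (the second 'del newData[key]' hits an already-deleted key); B returns the filtered dict there. — e.g. on validateParameter([("all", "1")], ["a"], ["l", "ll"]): A raises KeyError, B returns []
import Mathlib
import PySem

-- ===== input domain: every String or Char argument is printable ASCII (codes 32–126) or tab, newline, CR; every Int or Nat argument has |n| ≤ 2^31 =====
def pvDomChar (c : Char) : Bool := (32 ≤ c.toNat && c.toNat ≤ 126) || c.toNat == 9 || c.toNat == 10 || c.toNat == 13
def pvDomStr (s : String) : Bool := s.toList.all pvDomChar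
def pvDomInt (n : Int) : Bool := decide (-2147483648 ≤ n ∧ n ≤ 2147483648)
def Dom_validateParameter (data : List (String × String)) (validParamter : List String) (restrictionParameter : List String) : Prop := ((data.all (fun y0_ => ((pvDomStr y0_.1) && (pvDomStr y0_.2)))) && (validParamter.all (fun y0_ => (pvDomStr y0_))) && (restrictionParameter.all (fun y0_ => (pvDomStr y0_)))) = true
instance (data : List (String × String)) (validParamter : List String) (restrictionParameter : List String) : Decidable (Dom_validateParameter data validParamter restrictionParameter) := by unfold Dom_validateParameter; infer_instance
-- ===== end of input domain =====

-- B replaces A's key-major build/deepcopy/delete dict passes by parameter-major set algebra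
-- (matching-key sets, set difference, one projection); objective: alternative. Equivalence is
-- about the returned value (A's deepcopy of values copies equal strings).

-- ===== PORT A =====
def validateParameter (data : List (String × String)) (validParamter : List String) (restrictionParameter : List String) : List (String × String) :=
  -- newDict = {}; for key, value in data.items(): for parameter in validParamter: if parameter in key: newDict[key] = value
  let newDict : PySem.Dict String String :=
    data.foldl (fun d kv =>
      validParamter.foldl (fun d p => if PySem.Str.isIn p kv.1 then d.insert kv.1 kv.2 else d) d)
      PySem.Dict.empty
  -- newData = copy.deepcopy(newDict); for key, value in newDict.items(): for parameter in restrictionParameter: if parameter in key: del newData[key]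
  let newData : PySem.Dict String String :=
    newDict.items.foldl (fun nd kv =>
      restrictionParameter.foldl (fun nd p => if PySem.Str.isIn p kv.1 then nd.erase kv.1 else nd) nd)
      newDict
  newData.items

-- ===== PORT B =====
def validateParameter_alt (data : List (String × String)) (validParamter : List String) (restrictionParameter : List String) : List (String × String) :=
  -- keys = list(data)
  let keys : List String := data.map Prod.fst
  -- valid = set(); for p in validParamter: valid.update(k for k in keys if p in k)
  let valid : PySem.Set String :=
    validParamter.foldl (fun s p => PySem.Set.update s (keys.filter (fun k => PySem.Str.isIn p k))) PySem.Set.empty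
  -- restricted = set(); for p in restrictionParameter: restricted.update(k for k in keys if p in k)
  let restricted : PySem.Set String :=
    restrictionParameter.foldl (fun s p => PySem.Set.update s (keys.filter (fun k => PySem.Str.isIn p k))) PySem.Set.empty
  -- kept = valid - restricted
  let kept : PySem.Set String := PySem.Set.diff valid restricted
  -- {k: copy.deepcopy(v) for k, v in data.items() if k in kept}
  data.filter (fun kv => PySem.Set.contains kept kv.1)

-- ===== PRECONDITION & SPEC =====
-- Pre_ excludes (a) association lists with duplicate keys, which do not represent the Python
-- dict A receives, and (b) inputs where some key matching a valid parameter contains two or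
-- more restriction-parameter occurrences, on which A's second 'del newData[key]' raises KeyError.
def Pre_validateParameter (data : List (String × String)) (validParamter : List String) (restrictionParameter : List String) : Prop :=
  (data.map Prod.fst).Nodup ∧
  ∀ kv ∈ data, validParamter.any (fun p => PySem.Str.isIn p kv.1) = true →
    (restrictionParameter.filter (fun p => PySem.Str.isIn p kv.1)).length ≤ 1
instance (data : List (String × String)) (validParamter : List String) (restrictionParameter : List String) : Decidable (Pre_validateParameter data validParamter restrictionParameter) := by unfold Pre_validateParameter; infer_instance

def pvWitness_validateParameter : (List (String × String)) × List String × List String :=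
  ([("abc", "1"), ("xd", "2")], ["a", "x"], ["d"])

-- A raises KeyError when some key that matches a valid parameter contains at least two of the
-- restriction parameters (the second 'del' hits an already-deleted key); B returns the filtered dict there.
def Raises_validateParameter (data : List (String × String)) (validParamter : List String) (restrictionParameter : List String) : Prop :=
  (data.map Prod.fst).Nodup ∧
  ∃ kv ∈ data, validParamter.any (fun p => PySem.Str.isIn p kv.1) = true ∧
    2 ≤ (restrictionParameter.filter (fun p => PySem.Str.isIn p kv.1)).length
instance (data : List (String × String)) (validParamter : List String) (restrictionParameter : List String) : Decidable (Raises_validateParameter data validParamter restrictionParameter) := by unfold Raises_validateParameter; infer_instance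

def pvRaiseWitness_validateParameter : (List (String × String)) × List String × List String :=
  ([("all", "1")], ["a"], ["l", "ll"])
def pvRaiseWitnessOut_validateParameter : List (String × String) := []

def Spec_validateParameter (data : List (String × String)) (validParamter : List String) (restrictionParameter : List String) (out : List (String × String)) : Prop := out = validateParameter_alt data validParamter restrictionParameter
instance (data : List (String × String)) (validParamter : List String) (restrictionParameter : List String) (out : List (String × String)) : Decidable (Spec_validateParameter data validParamter restrictionParameter out) := by unfold Spec_validateParameter; infer_instance

-- ===== CLAIM (what is proved, stated in full; the proofs are below) =====
def Claim_equal_validateParameter : Prop := ∀ (data : List (String × String)) (validParamter : List String) (restrictionParameter : List String), Dom_validateParameter data validParamter restrictionParameter → Pre_validateParameter data validParamter restrictionParameter → Spec_validateParameter data validParamter restrictionParameter (validateParameter data validParamter restrictionParameter)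

def Claim_raises_validateParameter : Prop := (∀ (data : List (String × String)) (validParamter : List String) (restrictionParameter : List String), Dom_validateParameter data validParamter restrictionParameter → Raises_validateParameter data validParamter restrictionParameter → ¬ Pre_validateParameter data validParamter restrictionParameter) ∧ (Dom_validateParameter (pvRaiseWitness_validateParameter.1) (pvRaiseWitness_validateParameter.2.1) (pvRaiseWitness_validateParameter.2.2) ∧ Raises_validateParameter (pvRaiseWitness_validateParameter.1) (pvRaiseWitness_validateParameter.2.1) (pvRaiseWitness_validateParameter.2.2) ∧ validateParameter_alt (pvRaiseWitness_validateParameter.1) (pvRaiseWitness_validateParameter.2.1) (pvRaiseWitness_validateParameter.2.2) = pvRaiseWitnessOut_validateParameter)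

-- ===== LEMMAS AND PROOFS =====

-- a fold 'if Q a then f b else b' over a list with f idempotent applies f at most once
theorem foldl_if_once {α β : Type} (l : List α) (Q : α → Bool) (f : β → β)
    (hf : ∀ b, f (f b) = f b) (b : β) :
    l.foldl (fun b a => if Q a then f b else b) b = if l.any Q then f b else b := by
  induction l generalizing b with
  | nil => simp
  | cons a l ih =>
    simp only [List.foldl_cons, List.any_cons]
    by_cases h : Q a = true
    · simp [h, ih, hf]
    · simp at h; simp [h, ih]

theorem erase_idem {κ ν : Type} [BEq κ] (d : PySem.Dict κ ν) (k : κ) :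
    (d.erase k).erase k = d.erase k := by
  apply PySem.Dict.ext
  simp [PySem.Dict.erase, List.filter_filter]

-- stage 1: the insert loop over data with fresh, distinct keys appends exactly the valid-matching pairs
theorem stage1_items (vp : List String) :
    ∀ (data : List (String × String)) (d : PySem.Dict String String),
      (data.map Prod.fst).Nodup → (∀ kv ∈ data, d.contains kv.1 = false) →
      (data.foldl (fun d kv =>
          vp.foldl (fun d p => if PySem.Str.isIn p kv.1 then d.insert kv.1 kv.2 else d) d) d).items
        = d.items ++ data.filter (fun kv => vp.any (fun p => PySem.Str.isIn p kv.1)) := by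
  intro data
  induction data with
  | nil => intro d _ _; simp
  | cons kv data ih =>
    intro d hnd hfresh
    simp only [List.map_cons, List.nodup_cons] at hnd
    have hstep : vp.foldl (fun d p => if PySem.Str.isIn p kv.1 then d.insert kv.1 kv.2 else d) d
        = if vp.any (fun p => PySem.Str.isIn p kv.1) then d.insert kv.1 kv.2 else d :=
      foldl_if_once vp _ _ (fun b => PySem.Dict.insert_insert_self b kv.1 kv.2 kv.2) d
    simp only [List.foldl_cons, hstep]
    by_cases hv' : vp.any (fun p => PySem.Str.isIn p kv.1) = true
    case pos =>
      have hv := hv'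
      rw [if_pos hv, ih _ hnd.2 ?_]
      · simp [List.filter_cons, PySem.Dict.items_insert, hfresh kv (by simp)]
        simpa using hv
      case _ =>
        intro kv' h'
        rw [PySem.Dict.contains_insert]
        have : ¬ (kv'.1 = kv.1) := by
          intro h; exact hnd.1 (by rw [← h]; exact List.mem_map_of_mem h')
        simp [this, hfresh kv' (List.mem_cons_of_mem _ h')]
    case neg =>
      have hv : (vp.any (fun p => PySem.Str.isIn p kv.1)) = false := by
        simpa using hv'
      rw [if_neg (by simp only [hv]; decide), ih d hnd.2 (fun kv' h' => hfresh kv' (List.mem_cons_of_mem _ h'))]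
      simp [List.filter_cons]
      simpa using hv

-- stage 2: the erase loop filters out every pair whose key matches some listed pair with a restriction hit
theorem stage2_items (rp : List String) :
    ∀ (l : List (String × String)) (nd : PySem.Dict String String),
      (l.foldl (fun nd kv =>
          rp.foldl (fun nd p => if PySem.Str.isIn p kv.1 then nd.erase kv.1 else nd) nd) nd).items
        = nd.items.filter (fun q =>
            !(l.any (fun kv => q.1 == kv.1 && rp.any (fun p => PySem.Str.isIn p kv.1)))) := by
  intro l
  induction l with
  | nil => intro nd; simp
  | cons kv l ih =>
    intro nd
    have hstep : rp.foldl (fun nd p => if PySem.Str.isIn p kv.1 then nd.erase kv.1 else nd) nd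
        = if rp.any (fun p => PySem.Str.isIn p kv.1) then nd.erase kv.1 else nd :=
      foldl_if_once rp _ _ (fun b => erase_idem b kv.1) nd
    simp only [List.foldl_cons, hstep]
    by_cases hr : rp.any (fun p => PySem.Str.isIn p kv.1) = true
    · rw [if_pos hr, ih]
      simp only [PySem.Dict.erase, List.filter_filter]
      apply List.filter_congr
      intro q _
      simp only [List.any_cons, hr, Bool.and_true]
      cases h : (q.1 == kv.1) <;> simp
    · have hr' : (rp.any (fun p => PySem.Str.isIn p kv.1)) = false := by simpa using hr
      rw [if_neg (by simp only [hr']; decide), ih]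
      apply List.filter_congr
      intro q _
      simp only [List.any_cons, hr', Bool.and_false, Bool.false_or]

-- membership in B's parameter-major accumulation of matching-key sets
theorem mem_foldl_update (keys : List String) (ps : List String) :
    ∀ (s : PySem.Set String) (y : String), s.Nodup →
      (y ∈ ps.foldl (fun s p => PySem.Set.update s (keys.filter (fun k => PySem.Str.isIn p k))) s
        ↔ y ∈ s ∨ (y ∈ keys ∧ ps.any (fun p => PySem.Str.isIn p y) = true)) := by
  induction ps with
  | nil => intro s y _; simp
  | cons p ps ih =>
    intro s y hnd
    simp only [List.foldl_cons, List.any_cons]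
    rw [ih _ y (PySem.Set.nodup_update _ _ hnd), PySem.Set.mem_update]
    simp only [List.mem_filter, Bool.or_eq_true]
    tauto

theorem pv_decide_and_not (a b : Bool) : decide (a = true ∧ ¬ b = true) = (a && !b) := by
  cases a <;> cases b <;> decide

-- B computes the same key-major filter
theorem alt_eq_filter (data : List (String × String)) (vp rp : List String) :
    validateParameter_alt data vp rp
      = data.filter (fun kv => vp.any (fun p => PySem.Str.isIn p kv.1)
          && !(rp.any (fun p => PySem.Str.isIn p kv.1))) := by
  unfold validateParameter_alt
  apply List.filter_congr
  intro kv hmem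
  have hkey : kv.1 ∈ data.map Prod.fst := List.mem_map_of_mem hmem
  have hv := mem_foldl_update (data.map Prod.fst) vp PySem.Set.empty kv.1 (by simp [PySem.Set.empty])
  have hr := mem_foldl_update (data.map Prod.fst) rp PySem.Set.empty kv.1 (by simp [PySem.Set.empty])
  simp only [PySem.Set.empty, List.not_mem_nil, false_or] at hv hr
  rw [show ∀ (s : PySem.Set String) (x : String), PySem.Set.contains s x = decide (x ∈ s) from
    fun s x => by simp [PySem.Set.contains_eq_listContains]]
  simp only [PySem.Set.empty]
  have hd : (kv.1 ∈ PySem.Set.diff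
      (List.foldl (fun s p => PySem.Set.update s (List.filter (fun k => PySem.Str.isIn p k) (List.map Prod.fst data))) [] vp)
      (List.foldl (fun s p => PySem.Set.update s (List.filter (fun k => PySem.Str.isIn p k) (List.map Prod.fst data))) [] rp))
      ↔ ((vp.any (fun p => PySem.Str.isIn p kv.1)) = true ∧ ¬ (rp.any (fun p => PySem.Str.isIn p kv.1)) = true) := by
    rw [PySem.Set.mem_diff, hv, hr]
    constructor
    · rintro ⟨⟨_, h1⟩, h2⟩; exact ⟨h1, fun h => h2 ⟨hkey, h⟩⟩
    · rintro ⟨h1, h2⟩; exact ⟨⟨hkey, h1⟩, fun h => h2 h.2⟩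
  rw [decide_eq_decide.2 hd]
  exact pv_decide_and_not _ _

theorem validateParameter_spec : Claim_equal_validateParameter := by
  intro data vp rp _ hpre
  unfold Spec_validateParameter
  rw [alt_eq_filter]
  simp only [validateParameter]
  rw [stage2_items rp,
      stage1_items vp data PySem.Dict.empty hpre.1 (by simp [PySem.Dict.contains_empty])]
  simp only [show (PySem.Dict.empty : PySem.Dict String String).items = [] from rfl, List.nil_append]
  rw [List.filter_filter]
  apply List.filter_congr
  intro kv hmem
  by_cases hV : vp.any (fun p => PySem.Str.isIn p kv.1) = true
  · have key : ((data.filter (fun kv => vp.any (fun p => PySem.Str.isIn p kv.1))).any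
        (fun x => kv.1 == x.1 && rp.any (fun p => PySem.Str.isIn p x.1)))
        = rp.any (fun p => PySem.Str.isIn p kv.1) := by
      by_cases hr : rp.any (fun p => PySem.Str.isIn p kv.1) = true
      · rw [hr]
        exact List.any_eq_true.2 ⟨kv, List.mem_filter.2 ⟨hmem, hV⟩, by simp only [beq_self_eq_true, Bool.true_and]; exact hr⟩
      · have hr' := eq_false_of_ne_true hr
        rw [hr']
        refine List.any_eq_false.2 ?_
        intro x hx
        by_cases he : kv.1 = x.1
        · simp only [← he, beq_self_eq_true, Bool.true_and]; exact hr
        · simp [he]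
    rw [key, Bool.and_comm]
  · have hV' := eq_false_of_ne_true hV
    rw [hV']
    simp

@[simp] theorem validateParameter_raises : Claim_raises_validateParameter := by
  unfold Claim_raises_validateParameter
  refine ⟨?_, by decide⟩
  intro data vp rp _ hr hpre
  obtain ⟨kv, hkv, hv, h2⟩ := hr.2
  exact absurd (hpre.2 kv hkv hv) (by omega)
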